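-- pv_equiv track=rewrite | github.com/FennelDumplings/leetcode-maxed_out | LCP/61.py | temperatureTrend
-- ===== SOURCE A (Python) =====
-- from typing import List
--
-- def trend(A, i):
--     if A[i + 1] > A[i]:
--         return 1
--     elif A[i + 1] == A[i]:
--         return 0
--     else:
--         return -1
--
-- def temperatureTrend(temperatureA: List[int], temperatureB: List[int]) -> int:
--     n = len(temperatureA)
--     ans = 0
--     l = 0
--     while l < n - 1:
--         r = l
--         while r < n - 1 and trend(temperatureA, r) == trend(temperatureB, r):
--             r += 1
--         ans = max(ans, r - l)
--         l = r + 1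
--     return ans
-- ===== SOURCE B (Python) =====
-- def temperatureTrend(temperatureA, temperatureB):
--     n = len(temperatureA)
--     ans = 0
--     cur = 0
--     for i in range(n - 1):
--         da = temperatureA[i + 1] - temperatureA[i]
--         db = temperatureB[i + 1] - temperatureB[i]
--         if (da > 0) - (da < 0) == (db > 0) - (db < 0):
--             cur += 1
--             if cur > ans:
--                 ans = cur
--         else:
--             cur = 0
--     return ans
-- ===== Notes on version B (the rewrite author's own statement) =====
-- stated objective: simpler
-- what changed: Replaced the two-pointer outer/inner while-loop window (l jumping to r+1, r-l arithmetic) with one flat for-loop over i keeping a running streak counter cur and a maximum ans, reset on mismatch.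
import Mathlib
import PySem

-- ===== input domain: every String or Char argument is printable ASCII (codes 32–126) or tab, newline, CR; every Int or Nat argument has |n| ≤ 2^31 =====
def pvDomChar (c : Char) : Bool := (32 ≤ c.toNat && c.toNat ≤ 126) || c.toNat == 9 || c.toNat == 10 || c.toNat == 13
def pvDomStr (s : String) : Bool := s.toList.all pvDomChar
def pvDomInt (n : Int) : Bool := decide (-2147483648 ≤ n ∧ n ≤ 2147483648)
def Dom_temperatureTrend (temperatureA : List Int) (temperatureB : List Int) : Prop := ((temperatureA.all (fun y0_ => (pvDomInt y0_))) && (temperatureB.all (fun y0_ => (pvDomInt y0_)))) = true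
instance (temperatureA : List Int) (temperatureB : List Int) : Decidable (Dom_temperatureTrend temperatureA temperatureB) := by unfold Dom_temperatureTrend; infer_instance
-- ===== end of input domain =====

-- B replaces A's two-pointer outer/inner while-loop window with one flat indexed
-- pass keeping a running streak counter; objective: simpler.

-- ===== PORT A =====
-- trend(A, i); list indexing via pyGet? (none = IndexError)
def trendP (A : List Int) (i : Int) : Option Int :=
  match PySem.List.pyGet? A (i + 1), PySem.List.pyGet? A i with
  | some x, some y => some (if x > y then (1 : Int) else if x = y then 0 else -1)
  | _, _ => none

-- inner while: r advances while r < n-1 and trends match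
def innerA (tA tB : List Int) (n r : Int) : Int :=
  if h : r < n - 1 ∧ trendP tA r = trendP tB r then
    innerA tA tB n (r + 1)
  else r
termination_by (n - 1 - r).toNat
decreasing_by omega

-- needed to show the outer loop's l = r + 1 makes progress
theorem innerA_ge (tA tB : List Int) (n r : Int) : r ≤ innerA tA tB n r := by
  rw [innerA]
  split
  · have := innerA_ge tA tB n (r + 1)
    omega
  · omega
termination_by (n - 1 - r).toNat
decreasing_by rename_i h; omega

-- outer while over l
def outerA (tA tB : List Int) (n l ans : Int) : Int :=
  if _h : l < n - 1 then
    let r := innerA tA tB n l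
    outerA tA tB n (r + 1) (max ans (r - l))
  else ans
termination_by (n - 1 - l).toNat
decreasing_by have := innerA_ge tA tB n l; simp only [] at *; omega

def temperatureTrend (temperatureA : List Int) (temperatureB : List Int) : Int :=
  outerA temperatureA temperatureB (temperatureA.length : Int) 0 0

-- ===== PORT B =====
-- (d > 0) - (d < 0), Python's bool arithmetic
def sgnB (d : Int) : Int := (if d > 0 then 1 else 0) - (if d < 0 then 1 else 0)

-- one iteration of B's for-loop at index i; state = (ans, cur);
-- in-range indexing ported with pyGetD (exact inside Pre_, where indices are valid)
def stepI (tA tB : List Int) (s : Int × Int) (i : Nat) : Int × Int :=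
  let da := PySem.List.pyGetD tA ((i : Int) + 1) 0 - PySem.List.pyGetD tA (i : Int) 0
  let db := PySem.List.pyGetD tB ((i : Int) + 1) 0 - PySem.List.pyGetD tB (i : Int) 0
  if sgnB da = sgnB db then (max s.1 (s.2 + 1), s.2 + 1) else (s.1, 0)

def temperatureTrend_alt (temperatureA : List Int) (temperatureB : List Int) : Int :=
  ((List.range (temperatureA.length - 1)).foldl (stepI temperatureA temperatureB) (0, 0)).1

-- ===== PRECONDITION & SPEC =====
-- Pre_ excludes exactly the inputs where A raises IndexError (temperatureB shorter
-- than temperatureA, with at least two temperatureA entries so the loop runs);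
-- B raises there too.
def Pre_temperatureTrend (temperatureA : List Int) (temperatureB : List Int) : Prop :=
  temperatureA.length ≤ temperatureB.length ∨ temperatureA.length ≤ 1
instance (temperatureA : List Int) (temperatureB : List Int) : Decidable (Pre_temperatureTrend temperatureA temperatureB) := by unfold Pre_temperatureTrend; infer_instance

def pvWitness_temperatureTrend : List Int × List Int := ([1, 2, 2, 0], [5, 6, 6, 1])

def Spec_temperatureTrend (temperatureA : List Int) (temperatureB : List Int) (out : Int) : Prop := out = temperatureTrend_alt temperatureA temperatureB
instance (temperatureA : List Int) (temperatureB : List Int) (out : Int) : Decidable (Spec_temperatureTrend temperatureA temperatureB out) := by unfold Spec_temperatureTrend; infer_instance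

-- ===== CLAIM (what is proved, stated in full; the proofs are below) =====
def Claim_equal_temperatureTrend : Prop := ∀ (temperatureA : List Int) (temperatureB : List Int), Dom_temperatureTrend temperatureA temperatureB → Pre_temperatureTrend temperatureA temperatureB → Spec_temperatureTrend temperatureA temperatureB (temperatureTrend temperatureA temperatureB)

-- ===== LEMMAS AND PROOFS =====

-- trends-match boolean at index i, as B computes it
def bIdx (tA tB : List Int) (i : Nat) : Bool :=
  decide (sgnB (PySem.List.pyGetD tA ((i : Int) + 1) 0 - PySem.List.pyGetD tA (i : Int) 0)
        = sgnB (PySem.List.pyGetD tB ((i : Int) + 1) 0 - PySem.List.pyGetD tB (i : Int) 0))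

-- the list of "trends match" booleans, one per adjacent pair
def bsL (tA tB : List Int) : List Bool := (List.range (tA.length - 1)).map (bIdx tA tB)

-- length of the leading run of `true`
def leadT : List Bool → Nat
  | [] => 0
  | true :: t => leadT t + 1
  | false :: _ => 0

-- best streak reachable given a current streak `cur` before the list
def bestN (cur : Int) : List Bool → Int
  | [] => cur
  | true :: t => max (cur + 1) (bestN (cur + 1) t)
  | false :: t => max cur (bestN 0 t)

-- A's outer loop abstracted over the boolean list
def runO (bs : List Bool) (ans : Int) : Int :=
  if h : bs = [] then ans
  else runO (bs.drop (leadT bs + 1)) (max ans (leadT bs))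
termination_by bs.length
decreasing_by
  simp only [List.length_drop]
  have : 0 < bs.length := List.length_pos_iff.mpr h
  omega

def stepBool (s : Int × Int) (b : Bool) : Int × Int :=
  if b then (max s.1 (s.2 + 1), s.2 + 1) else (s.1, 0)

theorem bsL_length (tA tB : List Int) : (bsL tA tB).length = tA.length - 1 := by
  simp [bsL]

theorem foldB_eq_foldBool (tA tB : List Int) :
    (List.range (tA.length - 1)).foldl (stepI tA tB) (0, 0)
      = (bsL tA tB).foldl stepBool (0, 0) := by
  rw [bsL, List.foldl_map]
  congr 1
  funext s i
  simp only [stepI, stepBool, bIdx]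
  split_ifs with h1 h2 h2 <;> simp_all

theorem foldBool_fst (bs : List Bool) : ∀ (ans cur : Int), 0 ≤ cur → cur ≤ ans →
    (bs.foldl stepBool (ans, cur)).1 = max ans (bestN cur bs) := by
  induction bs with
  | nil => intro ans cur h1 h2; simp [bestN]; omega
  | cons b t ih =>
    intro ans cur h1 h2
    cases b with
    | true =>
      have hs : stepBool (ans, cur) true = (max ans (cur + 1), cur + 1) := by
        simp [stepBool]
      rw [List.foldl_cons, hs, ih (max ans (cur + 1)) (cur + 1) (by omega) (by omega)]
      simp only [bestN]
      omega
    | false =>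
      have hs : stepBool (ans, cur) false = (ans, 0) := by simp [stepBool]
      rw [List.foldl_cons, hs, ih ans 0 (by omega) (by omega)]
      simp only [bestN]
      omega

theorem bestN_jump (bs : List Bool) : ∀ (cur : Int), 0 ≤ cur →
    bestN cur bs = max (cur + leadT bs) (bestN 0 (bs.drop (leadT bs + 1))) := by
  induction bs with
  | nil => intro cur h; simp [bestN, leadT]; omega
  | cons b t ih =>
    intro cur h
    cases b with
    | true =>
      simp only [bestN, leadT]
      rw [ih (cur + 1) (by omega)]
      have hdrop : (true :: t).drop (leadT t + 1 + 1) = t.drop (leadT t + 1) := by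
        simp [List.drop_succ_cons]
      rw [hdrop]
      push_cast
      omega
    | false =>
      simp only [bestN, leadT, List.drop_succ_cons, List.drop_zero]
      rw [show ((0 : Nat) : Int) = 0 from rfl]
      omega

theorem runO_eq_bestN (bs : List Bool) (ans : Int) (h0 : 0 ≤ ans) :
    runO bs ans = max ans (bestN 0 bs) := by
  revert h0
  induction bs, ans using runO.induct with
  | case1 ans =>
    intro h; rw [runO]; simp [bestN]; omega
  | case2 bs ans hnil ih =>
    intro h
    rw [runO, dif_neg hnil]
    rw [ih (by omega)]
    rw [bestN_jump bs 0 (by omega)]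
    omega

-- trend bridge: in range, trend equals some (sign of difference)
theorem trendP_eq (A : List Int) (r : Nat) (h : r + 1 < A.length) :
    trendP A (r : Int) = some (sgnB (A[r + 1] - A[r])) := by
  unfold trendP
  have h1 : PySem.List.pyGet? A ((r : Int) + 1) = some A[r + 1] := by
    rw [show ((r : Int) + 1) = ((r + 1 : Nat) : Int) by push_cast; ring]
    rw [PySem.List.pyGet?_natCast]
    simp [List.getElem?_eq_getElem h]
  have h2 : PySem.List.pyGet? A ((r : Int)) = some A[r] := by
    rw [PySem.List.pyGet?_natCast]
    simp [List.getElem?_eq_getElem (by omega : r < A.length)]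
  rw [h1, h2]
  simp only [Option.some.injEq]
  simp only [sgnB]
  split_ifs <;> omega

-- bIdx in range, in terms of list elements
theorem bIdx_eq (tA tB : List Int) (i : Nat) (hB : tA.length ≤ tB.length)
    (hi : i + 1 < tA.length) :
    bIdx tA tB i = decide (sgnB (tA[i + 1] - tA[i]) = sgnB (tB[i + 1]'(by omega) - tB[i]'(by omega))) := by
  unfold bIdx
  have e1 : ((i : Int) + 1) = ((i + 1 : Nat) : Int) := by push_cast; ring
  rw [e1]
  simp only [PySem.List.pyGetD_natCast]
  rw [List.getD_eq_getElem tA 0 (by omega : i + 1 < tA.length),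
      List.getD_eq_getElem tA 0 (by omega : i < tA.length),
      List.getD_eq_getElem tB 0 (by omega : i + 1 < tB.length),
      List.getD_eq_getElem tB 0 (by omega : i < tB.length)]

theorem bsL_drop_cons (tA tB : List Int) (r : Nat) (hB : tA.length ≤ tB.length)
    (hr : r + 1 < tA.length) :
    (bsL tA tB).drop r =
      decide (sgnB (tA[r + 1] - tA[r]) = sgnB (tB[r + 1]'(by omega) - tB[r]'(by omega)))
        :: (bsL tA tB).drop (r + 1) := by
  have hlen : r < (bsL tA tB).length := by rw [bsL_length tA tB]; omega
  rw [List.drop_eq_getElem_cons hlen]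
  congr 1
  rw [show (bsL tA tB)[r] = bIdx tA tB r by simp [bsL]]
  exact bIdx_eq tA tB r hB hr

theorem inner_eq (tA tB : List Int) (hB : tA.length ≤ tB.length) :
    ∀ (k r : Nat), (bsL tA tB).length ≤ r + k →
      innerA tA tB (tA.length : Int) (r : Int) = (r : Int) + leadT ((bsL tA tB).drop r) := by
  intro k
  induction k with
  | zero =>
    intro r hk
    have hlen := bsL_length tA tB
    rw [innerA]
    rw [dif_neg]
    · rw [List.drop_of_length_le (by omega)]
      simp [leadT]
    · intro hcon
      have := hcon.1
      omega
  | succ k ih =>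
    intro r hk
    have hlen := bsL_length tA tB
    by_cases hr : (r : Int) < (tA.length : Int) - 1
    · have hr1 : r + 1 < tA.length := by omega
      have hcons := bsL_drop_cons tA tB r hB hr1
      by_cases hm : sgnB (tA[r + 1] - tA[r]) = sgnB (tB[r + 1]'(by omega) - tB[r]'(by omega))
      · -- trends match: one more step
        rw [innerA, dif_pos]
        · rw [show (r : Int) + 1 = ((r + 1 : Nat) : Int) by push_cast; ring]
          rw [ih (r + 1) (by omega)]
          rw [hcons, decide_eq_true hm]
          simp only [leadT]
          push_cast
          ring
        · refine ⟨hr, ?_⟩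
          rw [trendP_eq tA r hr1, trendP_eq tB r (by omega), hm]
      · -- trends differ: stop here
        rw [innerA, dif_neg]
        · rw [hcons, decide_eq_false hm]
          simp [leadT]
        · intro hcon
          apply hm
          have := hcon.2
          rw [trendP_eq tA r hr1, trendP_eq tB r (by omega)] at this
          exact Option.some.inj this
    · rw [innerA, dif_neg]
      · rw [List.drop_of_length_le (by omega)]
        simp [leadT]
      · intro hcon; exact hr hcon.1

theorem outer_eq (tA tB : List Int) (hB : tA.length ≤ tB.length) :
    ∀ (k l : Nat) (ans : Int), (bsL tA tB).length ≤ l + k →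
      outerA tA tB (tA.length : Int) (l : Int) ans = runO ((bsL tA tB).drop l) ans := by
  intro k
  induction k with
  | zero =>
    intro l ans hk
    have hlen := bsL_length tA tB
    rw [outerA, dif_neg (by omega)]
    rw [List.drop_of_length_le (by omega), runO]
    simp
  | succ k ih =>
    intro l ans hk
    have hlen := bsL_length tA tB
    by_cases hl : (l : Int) < (tA.length : Int) - 1
    · have hlt : l < (bsL tA tB).length := by omega
      rw [outerA, dif_pos hl]
      simp only []
      rw [inner_eq tA tB hB ((bsL tA tB).length) l (by omega)]
      set bs := (bsL tA tB).drop l with hbs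
      have hne : bs ≠ [] := by
        rw [hbs]
        intro hc
        have := congrArg List.length hc
        simp at this
        omega
      rw [runO, dif_neg hne]
      rw [show (l : Int) + (leadT bs : Int) - (l : Int) = (leadT bs : Int) by ring]
      have harg : (l : Int) + (leadT bs : Int) + 1 = ((l + leadT bs + 1 : Nat) : Int) := by
        push_cast; ring
      rw [harg, ih (l + leadT bs + 1) (max ans ((leadT bs : Nat) : Int)) (by omega)]
      have hdd : (bsL tA tB).drop (l + leadT bs + 1) = bs.drop (leadT bs + 1) := by
        rw [hbs, List.drop_drop]
        congr 1
      rw [hdd]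
    · rw [outerA, dif_neg hl]
      rw [List.drop_of_length_le (by omega), runO]
      simp

-- ===== VERDICT (by name: the statement is the Claim_ definition above) =====
theorem temperatureTrend_spec : Claim_equal_temperatureTrend := by
  intro tA tB _hdom hpre
  unfold Spec_temperatureTrend
  rcases hpre with hB | h1
  · unfold temperatureTrend temperatureTrend_alt
    rw [foldB_eq_foldBool tA tB]
    rw [foldBool_fst (bsL tA tB) 0 0 (by omega) (by omega)]
    have ho := outer_eq tA tB hB ((bsL tA tB).length) 0 0 (by omega)
    norm_num at ho
    rw [ho, runO_eq_bestN (bsL tA tB) 0 (by omega)]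
  · -- temperatureA has at most one element: neither loop runs, both sides are 0
    unfold temperatureTrend temperatureTrend_alt
    rw [outerA, dif_neg (by omega)]
    rw [show tA.length - 1 = 0 by omega]
    simp
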